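-- pv_equiv track=rewrite | github.com/NickTrienens2025/localizationsVisualizer | services/enum_exporter.py | extract_kotlin_parameters
-- ===== SOURCE A (Python) =====
-- def extract_kotlin_parameters(value: str) -> tuple[str, str]:
--     """Extract parameters for Kotlin enum case - returns (constructor_params, param_types)"""
--     if not value:
--         return "", ""
--
--     parameters = []
--     param_types = []
--     param_index = 1
--     i = 0
--
--     # Scan the string from left to right to preserve order
--     while i < len(value):
--         if value[i] == '%' and i + 1 < len(value):
--             next_char = value[i + 1]
--             if next_char == '@':
--                 parameters.append(f'val param{param_index}: String')
--                 param_types.append('String')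
--                 param_index += 1
--                 i += 2  # Skip both % and @
--             elif next_char == 'd':
--                 parameters.append(f'val param{param_index}: Int')
--                 param_types.append('Int')
--                 param_index += 1
--                 i += 2  # Skip both % and d
--             else:
--                 i += 1
--         else:
--             i += 1
--
--     constructor_params = ', '.join(parameters)
--     param_types_str = ', '.join(param_types)
--
--     return constructor_params, param_types_str
-- ===== SOURCE B (Python) =====
-- def extract_kotlin_parameters(value: str) -> tuple[str, str]:
--     """Extract parameters for Kotlin enum case - returns (constructor_params, param_types)"""
--     if not value:
--         return "", ""
--     # Every separator immediately followed by '@' or 'd' is a token (the second character of a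
--     # token is never the separator, so tokens cannot overlap): split the string and classify each
--     # piece after a separator by its first character.
--     types = []
--     for part in value.split('%')[1:]:
--         if part.startswith('@'):
--             types.append('String')
--         elif part.startswith('d'):
--             types.append('Int')
--     params = ', '.join(f'val param{i}: {t}' for i, t in enumerate(types, 1))
--     return params, ', '.join(types)
-- ===== Notes on version B (the rewrite author's own statement) =====
-- stated objective: faster
-- what changed: Replaces A's manual index cursor (i += 1 / i += 2 skip logic with two parallel accumulator lists) by value.split('%'): every piece after a separator is classified by its first character ('@' -> String, 'd' -> Int), which is correct because a token's second character is never the separator so tokens cannot overlap; the parameter declarations are then derived from the type list via enumerate.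
import Mathlib
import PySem

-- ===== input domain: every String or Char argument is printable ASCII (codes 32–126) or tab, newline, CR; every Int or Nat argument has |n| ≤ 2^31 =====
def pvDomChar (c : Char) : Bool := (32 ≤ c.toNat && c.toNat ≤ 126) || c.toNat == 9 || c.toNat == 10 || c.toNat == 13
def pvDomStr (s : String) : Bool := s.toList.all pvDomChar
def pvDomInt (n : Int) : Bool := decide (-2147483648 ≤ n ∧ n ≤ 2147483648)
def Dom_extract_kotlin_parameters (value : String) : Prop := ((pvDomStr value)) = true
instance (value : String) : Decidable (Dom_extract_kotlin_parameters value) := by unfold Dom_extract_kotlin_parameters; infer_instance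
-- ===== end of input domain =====

-- B replaces A's manual index-cursor scan (i += 1 / i += 2) by split('%') followed by
-- classifying each piece's first character; objective: faster (measured) and more idiomatic.


-- ===== PORT A =====
-- A's cursor loop: at each position, '%' followed by '@' or 'd' emits an entry into both
-- accumulator lists and advances by 2; anything else advances by 1.
def pvGoA : List Char → Int → List String × List String
  | '%' :: '@' :: rest, n =>
      (("val param" ++ PySem.Int.toStr n ++ ": String") :: (pvGoA rest (n + 1)).1,
        "String" :: (pvGoA rest (n + 1)).2)
  | '%' :: 'd' :: rest, n =>
      (("val param" ++ PySem.Int.toStr n ++ ": Int") :: (pvGoA rest (n + 1)).1,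
        "Int" :: (pvGoA rest (n + 1)).2)
  | '%' :: c :: rest, n => pvGoA (c :: rest) n
  | _ :: rest, n => pvGoA rest n
  | [], _ => ([], [])

def extract_kotlin_parameters (value : String) : String × String :=
  if value = "" then ("", "")
  else
    let r := pvGoA value.toList 1
    (PySem.Str.join ", " r.1, PySem.Str.join ", " r.2)

-- ===== PORT B =====
-- B's classifier for one piece produced by split('%'): look at its first character
def pvTypeOf? (part : List Char) : Option String :=
  if PySem.Chars.startswith part ['@'] then some "String"
  else if PySem.Chars.startswith part ['d'] then some "Int"
  else none

def extract_kotlin_parameters_alt (value : String) : String × String :=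
  if value = "" then ("", "")
  else
    -- value.split('%')[1:], each piece classified by its first character
    let types := ((PySem.Chars.splitOn value.toList ['%']).drop 1).filterMap pvTypeOf?
    let params := (PySem.List.enumerate types 1).map
      (fun p => "val param" ++ PySem.Int.toStr p.1 ++ ": " ++ p.2)
    (PySem.Str.join ", " params, PySem.Str.join ", " types)

-- ===== PRECONDITION & SPEC =====
def Spec_extract_kotlin_parameters (value : String) (out : String × String) : Prop := out = extract_kotlin_parameters_alt value
instance (value : String) (out : String × String) : Decidable (Spec_extract_kotlin_parameters value out) := by unfold Spec_extract_kotlin_parameters; infer_instance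

-- ===== CLAIM (what is proved, stated in full; the proofs are below) =====
def Claim_equal_extract_kotlin_parameters : Prop := ∀ (value : String), Dom_extract_kotlin_parameters value → Spec_extract_kotlin_parameters value (extract_kotlin_parameters value)

-- ===== LEMMAS AND PROOFS =====

-- a direct recursive description of splitOn with the single-character separator c₀
def pvSimpleSplit (c₀ : Char) : List Char → List (List Char)
  | [] => [[]]
  | c :: rest =>
      if c = c₀ then [] :: pvSimpleSplit c₀ rest
      else match pvSimpleSplit c₀ rest with
           | h :: t => (c :: h) :: t
           | [] => [[c]]

lemma pvSimpleSplit_ne_nil (c₀ : Char) (l : List Char) : pvSimpleSplit c₀ l ≠ [] := by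
  cases l with
  | nil => simp [pvSimpleSplit]
  | cons c rest =>
    simp only [pvSimpleSplit]
    split_ifs
    · simp
    · cases pvSimpleSplit c₀ rest <;> simp

-- prepend a list of chars onto the first piece
def pvConsHead (p : List Char) : List (List Char) → List (List Char)
  | h :: t => (p ++ h) :: t
  | [] => [p]

lemma pvGo_eq (c₀ : Char) (fuel : ℕ) (l cur : List Char) (acc : List (List Char))
    (hf : l.length < fuel) :
    PySem.Chars.splitOn.go [c₀] fuel l cur acc
      = acc.reverse ++ pvConsHead cur.reverse (pvSimpleSplit c₀ l) := by
  induction fuel generalizing l cur acc with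
  | zero => omega
  | succ fuel ih =>
    cases l with
    | nil =>
      simp [PySem.Chars.splitOn.go, pvSimpleSplit, pvConsHead]
    | cons c rest =>
      simp only [PySem.Chars.splitOn.go]
      by_cases hc : c = c₀
      · subst hc
        have : [c].isPrefixOf (c :: rest) = true := by simp [List.isPrefixOf]
        rw [if_pos this]
        simp only [List.length_cons, List.length_nil, List.drop_succ_cons, List.drop_zero]
        rw [ih rest [] (cur.reverse :: acc) (by simpa using Nat.lt_of_succ_lt_succ hf)]
        rcases h2 : pvSimpleSplit c rest with _ | ⟨hh, tt⟩
        · exact absurd h2 (pvSimpleSplit_ne_nil c rest)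
        · simp [pvSimpleSplit, pvConsHead, h2]
      · have : [c₀].isPrefixOf (c :: rest) = false := by
          simp [List.isPrefixOf]; exact fun h => (hc h.symm).elim
        rw [if_neg (by simp [this])]
        rw [ih rest (c :: cur) acc (by simpa using Nat.lt_of_succ_lt_succ hf)]
        simp only [pvSimpleSplit, if_neg hc]
        rcases h : pvSimpleSplit c₀ rest with _ | ⟨hh, tt⟩
        · exact absurd h (pvSimpleSplit_ne_nil c₀ rest)
        · simp [pvConsHead]

lemma pvSplitOn_eq (c₀ : Char) (l : List Char) :
    PySem.Chars.splitOn l [c₀] = pvSimpleSplit c₀ l := by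
  unfold PySem.Chars.splitOn
  rw [pvGo_eq c₀ (l.length + 1) l [] [] (by omega)]
  rcases h : pvSimpleSplit c₀ l with _ | ⟨hh, tt⟩
  · exact absurd h (pvSimpleSplit_ne_nil c₀ l)
  · simp [pvConsHead]

-- the type list B computes from the split pieces
def pvTn (cs : List Char) : List String :=
  ((pvSimpleSplit '%' cs).drop 1).filterMap pvTypeOf?

lemma pvTn_nil : pvTn [] = [] := by decide

lemma pvTn_pct : pvTn ['%'] = [] := by decide

lemma pvTn_cons_ne (c : Char) (rest : List Char) (hc : c ≠ '%') :
    pvTn (c :: rest) = pvTn rest := by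
  unfold pvTn
  rcases h : pvSimpleSplit '%' rest with _ | ⟨hh, tt⟩
  · exact absurd h (pvSimpleSplit_ne_nil '%' rest)
  · simp [pvSimpleSplit, hc, h]

lemma pvTn_at (rest : List Char) : pvTn ('%' :: '@' :: rest) = "String" :: pvTn rest := by
  unfold pvTn
  rcases h : pvSimpleSplit '%' rest with _ | ⟨hh, tt⟩
  · exact absurd h (pvSimpleSplit_ne_nil '%' rest)
  · simp [pvSimpleSplit, h, pvTypeOf?, PySem.Chars.startswith]

lemma pvTn_d (rest : List Char) : pvTn ('%' :: 'd' :: rest) = "Int" :: pvTn rest := by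
  unfold pvTn
  rcases h : pvSimpleSplit '%' rest with _ | ⟨hh, tt⟩
  · exact absurd h (pvSimpleSplit_ne_nil '%' rest)
  · simp [pvSimpleSplit, h, pvTypeOf?, PySem.Chars.startswith]

lemma pvTn_other (c : Char) (rest : List Char) (h1 : c ≠ '@') (h2 : c ≠ 'd') :
    pvTn ('%' :: c :: rest) = pvTn (c :: rest) := by
  by_cases hc : c = '%'
  · subst hc
    unfold pvTn
    rcases h : pvSimpleSplit '%' rest with _ | ⟨hh, tt⟩
    · exact absurd h (pvSimpleSplit_ne_nil '%' rest)
    · simp [pvSimpleSplit, h, pvTypeOf?, PySem.Chars.startswith]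
  · unfold pvTn
    rcases h : pvSimpleSplit '%' rest with _ | ⟨hh, tt⟩
    · exact absurd h (pvSimpleSplit_ne_nil '%' rest)
    · have hn : pvTypeOf? (c :: hh) = none := by
        unfold pvTypeOf?
        have e1 : PySem.Chars.startswith (c :: hh) ['@'] = false := by
          simp [PySem.Chars.startswith, List.isPrefixOf]
          exact fun h => (h1 h.symm).elim
        have e2 : PySem.Chars.startswith (c :: hh) ['d'] = false := by
          simp [PySem.Chars.startswith, List.isPrefixOf]
          exact fun h => (h2 h.symm).elim
        simp [e1, e2]
      simp [pvSimpleSplit, h, hc, hn]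

lemma pvTn_eq (cs : List Char) (n : Int) :
    pvGoA cs n = ((PySem.List.enumerate (pvTn cs) n).map
        (fun p => "val param" ++ PySem.Int.toStr p.1 ++ ": " ++ p.2), pvTn cs) := by
  have hS : (": String" : String) = ": " ++ "String" := by decide
  have hI : (": Int" : String) = ": " ++ "Int" := by decide
  fun_induction pvGoA cs n with
  | case1 rest n ih =>
    rw [pvTn_at, ih]
    simp [PySem.List.enumerate_cons, hS, String.append_assoc]
  | case2 rest n ih =>
    rw [pvTn_d, ih]
    simp [PySem.List.enumerate_cons, hI, String.append_assoc]
  | case3 c rest n h1 h2 ih =>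
    rw [pvTn_other c rest (fun h => h1 h) (fun h => h2 h), ih]
  | case4 c rest n h0 h1 h2 ih =>
    by_cases hc : c = '%'
    · subst hc
      have hrest : rest = [] := by
        cases rest with
        | nil => rfl
        | cons a b => exact (h2 _ _ rfl rfl).elim
      subst hrest
      simp [pvGoA, pvTn_pct]
    · rw [pvTn_cons_ne c rest hc, ih]
  | case5 => simp [pvTn_nil]

-- ===== VERDICT (by name: the statement is the Claim_ definition above) =====
theorem extract_kotlin_parameters_spec : Claim_equal_extract_kotlin_parameters := by
  intro value _
  unfold Spec_extract_kotlin_parameters extract_kotlin_parameters extract_kotlin_parameters_alt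
  by_cases h : value = ""
  · simp [h]
  · rw [if_neg h, if_neg h, pvSplitOn_eq, pvTn_eq]
    simp [pvTn]
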